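-- pv_equiv track=rewrite | github.com/Criadocf/SEMANA-15 | 01.py | larger_row_position
-- ===== SOURCE A (Python) =====
-- def larger_row_position(n):
--   larger_linha = []
--   maior_linha = -999999
--   for k in range(len(n)):
--     for m in n[k]:
--       if m > maior_linha:
--         maior_linha = m
--         position = n.index(n[k])
--   larger_linha.append(position)
--   return tuple(larger_linha)
-- ===== SOURCE B (Python) =====
-- def larger_row_position(n):
--   candidates = [(max(row), i) for i, row in enumerate(n) if row]
--   best = max(candidates, key=lambda t: t[0])
--   return (best[1],)
-- ===== Notes on version B (the rewrite author's own statement) =====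
-- stated objective: alternative
-- what changed: B reduces each row to its max once and takes a single argmax over (row-max, index) pairs, instead of A's element-wise nested scan that re-searches the matrix with n.index(n[k]) on every new running maximum; A's n.index row searches are worst-case quadratic while B is one pass.
import Mathlib
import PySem

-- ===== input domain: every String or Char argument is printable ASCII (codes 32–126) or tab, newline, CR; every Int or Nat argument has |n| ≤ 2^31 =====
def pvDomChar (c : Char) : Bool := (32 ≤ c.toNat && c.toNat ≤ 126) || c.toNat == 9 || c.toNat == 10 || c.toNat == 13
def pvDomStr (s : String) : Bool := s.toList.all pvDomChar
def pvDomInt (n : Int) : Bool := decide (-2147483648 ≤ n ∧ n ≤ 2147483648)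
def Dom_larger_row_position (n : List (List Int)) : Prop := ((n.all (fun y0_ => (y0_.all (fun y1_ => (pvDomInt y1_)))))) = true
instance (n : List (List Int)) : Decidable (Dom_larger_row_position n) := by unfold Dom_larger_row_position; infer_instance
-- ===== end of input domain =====

-- B replaces A's element-wise nested scan with repeated n.index calls by a per-row max
-- plus one argmax over (row-max, row-index) pairs; equivalence of return values is
-- proved on Pre_ (A raises NameError when no element exceeds its -999999 sentinel).

-- ===== PORT A =====
def larger_row_position (n : List (List Int)) : List Int :=
  let st := (PySem.List.pyRange 0 (PySem.List.len n) 1).foldl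
    (fun (st : Int × Option Int) k =>
      (PySem.List.pyGetD n k []).foldl
        (fun (st : Int × Option Int) m =>
          if m > st.1 then
            (m, (PySem.List.index? n (PySem.List.pyGetD n k [])).map (fun j => (j : Int)))
          else st) st)
    ((-999999 : Int), (none : Option Int))
  match st.2 with
  | some p => [p]
  | none => []   -- Python raises NameError/UnboundLocalError here (position never assigned); outside Pre_

-- ===== PORT B =====
-- '[(max(row), i) for i, row in enumerate(n) if row]': PySem.List.max? row id is
-- some (max of row) exactly on the non-empty rows, so filterMap renders the guarded
-- comprehension exactly.
def larger_row_position_alt (n : List (List Int)) : List Int :=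
  let candidates := (PySem.List.enumerate n 0).filterMap
    (fun p => (PySem.List.max? p.2 (fun x => x)).map (fun v => (v, p.1)))
  match PySem.List.max? candidates (fun t => t.1) with
  | some best => [best.2]
  | none => []   -- Python raises ValueError (max of empty sequence); outside Pre_

-- ===== PRECONDITION & SPEC =====
-- Pre_ admits exactly the inputs on which A returns: some element must exceed A's
-- -999999 sentinel, otherwise A's 'position' is never assigned and A raises.
def Pre_larger_row_position (n : List (List Int)) : Prop :=
  ∃ row ∈ n, ∃ m ∈ row, (-999999 : Int) < m
instance (n : List (List Int)) : Decidable (Pre_larger_row_position n) := by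
  unfold Pre_larger_row_position; infer_instance

def pvWitness_larger_row_position : List (List Int) := [[0]]

def Spec_larger_row_position (n : List (List Int)) (out : List Int) : Prop := out = larger_row_position_alt n
instance (n : List (List Int)) (out : List Int) : Decidable (Spec_larger_row_position n out) := by unfold Spec_larger_row_position; infer_instance

-- ===== CLAIM (what is proved, stated in full; the proofs are below) =====
def Claim_equal_larger_row_position : Prop := ∀ (n : List (List Int)), Dom_larger_row_position n → Pre_larger_row_position n → Spec_larger_row_position n (larger_row_position n)

-- ===== LEMMAS AND PROOFS =====

-- A's per-row inner loop, as a function of the row (proof helper)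
def fA (n : List (List Int)) (st : Int × Option Int) (row : List Int) : Int × Option Int :=
  row.foldl
    (fun (st : Int × Option Int) m =>
      if m > st.1 then (m, (PySem.List.index? n row).map (fun j => (j : Int))) else st) st

-- reference step: same inner loop but storing the row's enumerate index
def fR (st : Int × Option Int) (p : Int × List Int) : Int × Option Int :=
  p.2.foldl (fun (st : Int × Option Int) m => if m > st.1 then (m, some p.1) else st) st

def pairStep (st : Int × Option Int) (q : Int × Int) : Int × Option Int :=
  if st.1 < q.1 then (q.1, some q.2) else st

def maxStep (acc : Option (Int × Int)) (q : Int × Int) : Option (Int × Int) :=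
  match acc with
  | none => some q
  | some m => if m.1 < q.1 then some q else some m

-- relation between A's running state and B's max?-accumulator
def InvAB (st : Int × Option Int) (acc : Option (Int × Int)) : Prop :=
  (st = ((-999999 : Int), none) ∧ (acc = none ∨ ∃ q, acc = some q ∧ q.1 ≤ -999999))
  ∨ (∃ q, acc = some q ∧ st = (q.1, some q.2) ∧ (-999999 : Int) < q.1)

lemma invStep (st : Int × Option Int) (acc : Option (Int × Int)) (q : Int × Int)
    (h : InvAB st acc) : InvAB (pairStep st q) (maxStep acc q) := by
  rcases h with ⟨hst, hacc⟩ | ⟨q', hacc, hst, hlt⟩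
  · subst hst
    rcases hacc with hacc | ⟨q', hacc, hle⟩ <;> subst hacc <;>
      simp only [pairStep, maxStep] <;> split_ifs <;>
        first
          | (left; constructor; rfl)
          | skip
    all_goals simp_all [InvAB]
    all_goals omega
  · subst hacc; subst hst
    simp only [pairStep, maxStep]
    split_ifs with h1
    · right; exact ⟨q, rfl, rfl, by omega⟩
    · right; exact ⟨q', rfl, rfl, hlt⟩

lemma foldl_max_init (a b : Int) (t : List Int) :
    t.foldl max (max a b) = max a (t.foldl max b) := by
  induction t generalizing b with
  | nil => simp
  | cons c t ih => simp only [List.foldl_cons, max_assoc]; exact ih _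

-- A's inner row loop is a single running-max step for the whole row
lemma fR_char (t : List Int) : ∀ (m : Int) (st : Int × Option Int) (i : Int),
    fR st (i, m :: t) = pairStep st (t.foldl max m, i) := by
  induction t with
  | nil =>
    intro m st i
    simp only [fR, pairStep, List.foldl_cons, List.foldl_nil]
  | cons m' t' ih =>
    intro m st i
    have hstep : fR st (i, m :: m' :: t') = fR (if m > st.1 then (m, some i) else st) (i, m' :: t') := rfl
    rw [hstep, ih m' _ i]
    have hfold : (m' :: t').foldl max m = max m (t'.foldl max m') := by
      simp only [List.foldl_cons]
      exact foldl_max_init m m' t'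
    rw [hfold]
    simp only [pairStep]
    rcases le_total m (t'.foldl max m') with hmF | hmF
    · rw [max_eq_right hmF]
      split_ifs <;> first | rfl | (exfalso; omega) | (congr 1; omega)
    · rw [max_eq_left hmF]
      split_ifs <;> first | rfl | (exfalso; omega)

-- the invariant carried over whole rows: A's fR against B's per-row-max fold
lemma invFoldRows : ∀ (l : List (Int × List Int)) (st : Int × Option Int) (acc : Option (Int × Int)),
    InvAB st acc →
    InvAB (l.foldl fR st)
      (l.foldl (fun acc p =>
        match (PySem.List.max? p.2 (fun x => x)).map (fun v => (v, p.1)) with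
        | some q => maxStep acc q
        | none => acc) acc) := by
  intro l
  induction l with
  | nil => intro st acc h; exact h
  | cons p t ih =>
    intro st acc h
    rcases p with ⟨i, row⟩
    cases row with
    | nil => exact ih st acc h
    | cons m tr =>
      simp only [List.foldl_cons]
      rw [fR_char tr m st i, PySem.List.max?_id_cons]
      exact ih _ _ (invStep st acc (tr.foldl max m, i) h)

-- the inner loop does not care which index value it stores, as long as the stored
-- option is 'some k' whenever it fires at all
lemma inner_eq (J : Option Int) (k : Int) :
    ∀ (row : List Int) (st : Int × Option Int),
    ((∃ m ∈ row, st.1 < m) → J = some k) →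
    row.foldl (fun (st : Int × Option Int) m => if m > st.1 then (m, J) else st) st
      = row.foldl (fun (st : Int × Option Int) m => if m > st.1 then (m, some k) else st) st := by
  intro row
  induction row with
  | nil => intro st _; rfl
  | cons m t ih =>
    intro st hJ
    by_cases h : st.1 < m
    · have hj : J = some k := hJ ⟨m, List.mem_cons_self, h⟩
      subst hj
      rfl
    · simp only [List.foldl_cons, gt_iff_lt, if_neg h]
      exact ih st (fun ⟨m', hm', hlt⟩ => hJ ⟨m', List.mem_cons_of_mem _ hm', hlt⟩)

-- monotonicity of the reference inner loop
lemma fR_mono (i : Int) : ∀ (row : List Int) (st : Int × Option Int),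
    st.1 ≤ (fR st (i, row)).1 ∧ ∀ m ∈ row, m ≤ (fR st (i, row)).1 := by
  intro row
  induction row with
  | nil => intro st; exact ⟨le_refl _, by simp⟩
  | cons m t ih =>
    intro st
    have hstep : (fR st (i, m :: t)) = fR (if m > st.1 then (m, some i) else st) (i, t) := rfl
    rw [hstep]
    obtain ⟨h1, h2⟩ := ih (if m > st.1 then (m, some i) else st)
    refine ⟨le_trans ?_ h1, ?_⟩
    · split_ifs with h
      · exact le_of_lt h
      · exact le_refl _
    · intro m' hm'
      rcases List.mem_cons.mp hm' with rfl | hm'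
      · refine le_trans ?_ h1
        split_ifs with h
        · exact le_refl _
        · exact not_lt.mp h
      · exact h2 m' hm'

-- A's row loop equals the reference loop that stores the enumerate index
lemma rows_eq (n : List (List Int)) :
    ∀ (rest pre : List (List Int)) (st : Int × Option Int),
    n = pre ++ rest → (∀ row ∈ pre, ∀ m ∈ row, m ≤ st.1) →
    rest.foldl (fA n) st = (PySem.List.enumerate rest (pre.length : Int)).foldl fR st := by
  intro rest
  induction rest with
  | nil => intro pre st _ _; simp [PySem.List.enumerate_nil]
  | cons row rest' ih =>
    intro pre st hn hinv
    rw [PySem.List.enumerate_cons]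
    simp only [List.foldl_cons]
    have hhead : fA n st row = fR st ((pre.length : Int), row) := by
      by_cases hex : ∃ m ∈ row, st.1 < m
      · have hnotin : row ∉ pre := by
          intro hmem
          obtain ⟨m, hm, hlt⟩ := hex
          exact absurd (hinv row hmem m hm) (not_le.mpr hlt)
        have hidx : PySem.List.index? n row = some pre.length :=
          (PySem.List.index?_eq_some_iff n row pre.length).mpr ⟨pre, rest', hn, rfl, hnotin⟩
        unfold fA fR
        exact inner_eq _ _ row st (fun _ => by rw [hidx]; rfl)
      · unfold fA fR
        exact inner_eq _ _ row st (fun h => absurd h hex)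
    rw [hhead]
    have hlen : ((pre.length : Int) + 1) = ((pre ++ [row]).length : Int) := by
      simp
    rw [hlen]
    refine ih (pre ++ [row]) (fR st ((pre.length : Int), row)) (by simpa using hn) ?_
    intro row' hrow' m hm
    obtain ⟨hmono, hrow_le⟩ := fR_mono (pre.length : Int) row st
    rcases List.mem_append.mp hrow' with hrow' | hrow'
    · exact le_trans (hinv row' hrow' m hm) hmono
    · rcases List.mem_singleton.mp hrow' with rfl
      exact hrow_le m hm

-- A's outer index loop is the fold of fA over the rows
lemma portA_fold (n : List (List Int)) :
    (PySem.List.pyRange 0 (PySem.List.len n) 1).foldl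
      (fun (st : Int × Option Int) k =>
        (PySem.List.pyGetD n k []).foldl
          (fun (st : Int × Option Int) m =>
            if m > st.1 then
              (m, (PySem.List.index? n (PySem.List.pyGetD n k [])).map (fun j => (j : Int)))
            else st) st)
      ((-999999 : Int), (none : Option Int))
    = n.foldl (fA n) ((-999999 : Int), none) :=
  PySem.List.foldl_pyRange_zero_pyGetD n [] (fA n) ((-999999 : Int), none)

lemma max?_eq_foldl (l : List (Int × Int)) :
    PySem.List.max? l (fun t => t.1) = l.foldl maxStep none := by
  unfold PySem.List.max?
  refine congrArg (fun f => List.foldl f none l) ?_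
  funext acc x
  cases acc <;> rfl

theorem larger_row_position_spec : Claim_equal_larger_row_position := by
  intro n _ hpre
  show larger_row_position n = larger_row_position_alt n
  obtain ⟨row, hrow, m, hm, hgt⟩ := hpre
  -- the row containing m contributes a candidate (v, k) with m ≤ v
  obtain ⟨k, hk, hget⟩ := List.mem_iff_getElem.mp hrow
  have henum : ((k : Int), row) ∈ PySem.List.enumerate n 0 := by
    rw [PySem.List.mem_enumerate_iff]
    exact ⟨k, hk, by simp [hget]⟩
  obtain ⟨v, hv⟩ : ∃ v, PySem.List.max? row (fun x => x) = some v := by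
    rcases h : PySem.List.max? row (fun x : Int => x) with _ | v
    · rw [PySem.List.max?_eq_none_iff] at h
      subst h; exact absurd hm (List.not_mem_nil)
    · exact ⟨v, rfl⟩
  have hmv : m ≤ v := PySem.List.max?_isMax hv m hm
  have hcand : (v, (k : Int)) ∈ (PySem.List.enumerate n 0).filterMap
      (fun p => (PySem.List.max? p.2 (fun x => x)).map (fun v => (v, p.1))) :=
    List.mem_filterMap.mpr ⟨((k : Int), row), henum, by rw [hv]; rfl⟩
  -- B's outer max? is some q with q.1 maximal, so -999999 < q.1
  obtain ⟨q, hq⟩ : ∃ q, PySem.List.max?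
      ((PySem.List.enumerate n 0).filterMap
        (fun p => (PySem.List.max? p.2 (fun x => x)).map (fun v => (v, p.1)))) (fun t => t.1) = some q := by
    rcases h : PySem.List.max? _ (fun t : Int × Int => t.1) with _ | q
    · rw [PySem.List.max?_eq_none_iff] at h
      exact absurd h (List.ne_nil_of_mem hcand)
    · exact ⟨q, rfl⟩
  have hq1 : (-999999 : Int) < q.1 :=
    lt_of_lt_of_le hgt (le_trans hmv (PySem.List.max?_isMax hq (v, (k : Int)) hcand))
  -- the invariant relates A's state fold to B's candidate fold
  have hinv := invFoldRows (PySem.List.enumerate n 0)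
    ((-999999 : Int), none) none (Or.inl ⟨rfl, Or.inl rfl⟩)
  have hBfold : (PySem.List.max?
      ((PySem.List.enumerate n 0).filterMap
        (fun p => (PySem.List.max? p.2 (fun x => x)).map (fun v => (v, p.1)))) (fun t => t.1))
      = (PySem.List.enumerate n 0).foldl (fun acc p =>
          match (PySem.List.max? p.2 (fun x => x)).map (fun v => (v, p.1)) with
          | some q => maxStep acc q
          | none => acc) none := by
    rw [max?_eq_foldl, List.foldl_filterMap]
    refine congrArg (fun f => List.foldl f (none : Option (Int × Int)) (PySem.List.enumerate n 0)) ?_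
    funext acc p
    rcases (PySem.List.max? p.2 (fun x => x)).map (fun v => (v, p.1)) with _ | q <;> rfl
  rw [← hBfold, hq] at hinv
  have hstate : (PySem.List.enumerate n 0).foldl fR ((-999999 : Int), none) = (q.1, some q.2) := by
    rcases hinv with ⟨_, hacc⟩ | ⟨q', hacc, hst, _⟩
    · rcases hacc with hacc | ⟨q', hacc, hle⟩
      · exact absurd hacc (by simp)
      · rw [Option.some_inj] at hacc; subst hacc; omega
    · rw [Option.some_inj] at hacc; subst hacc; exact hst
  -- assemble both sides
  have hA : n.foldl (fA n) ((-999999 : Int), none)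
      = (PySem.List.enumerate n (([] : List (List Int)).length : Int)).foldl fR ((-999999 : Int), none) :=
    rows_eq n n [] ((-999999 : Int), none) rfl (by simp)
  simp only [List.length_nil, Int.natCast_zero] at hA
  calc larger_row_position n = [q.2] := by
        simp only [larger_row_position]
        rw [portA_fold, hA, hstate]
    _ = larger_row_position_alt n := by
        simp only [larger_row_position_alt]
        rw [hq]
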